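-- pv_equiv track=rewrite | github.com/6ka/totally_balanced_structures | DLC/doubly_lexical_order.py | gamma_free_matrix_bottom_up
-- ===== SOURCE A (Python) =====
-- def gamma_free_matrix_bottom_up(matrix, transform_to_gamma_free=False):
--     """ adds 0
--
--     :param matrix:
--     :param transform_to_gamma_free:
--     :return:
--     """
--     was_gamma_free = True
--     for i in range(len(matrix) - 1, -1, -1):
--         j = 0
--         while j < len(matrix[i]):
--             if matrix[i][j] == 0:
--                 j += 1
--                 continue
--
--             i_next = i + 1
--             while i_next < len(matrix) and matrix[i_next][j] == 0:
--                 i_next += 1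
--
--             if i_next == len(matrix):
--                 j += 1
--                 continue
--
--             j_next = j + 1
--             while j_next < len(matrix[i]):
--                 while j_next < len(matrix[i]) and matrix[i][j_next] == 0:
--                     j_next += 1
--
--                 if j_next == len(matrix[i]):
--                     j_next = j + 1
--                     break
--
--                 if matrix[i_next][j_next] == 0:
--                     was_gamma_free = False
--                     if transform_to_gamma_free:
--                         matrix[i][j_next] = 0
--                     else:
--                         return was_gamma_free
--                 else:
--                     break
--
--             j = j_next
--     return was_gamma_free
-- ===== SOURCE B (Python) =====
-- def gamma_free_matrix_bottom_up(matrix, transform_to_gamma_free=False):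
--     """Bottom-up scan that keeps, for every column, the nearest row below the
--     current one with a nonzero entry, instead of rescanning the column for
--     every pivot.  Like the original, it zeroes offending entries of `matrix`
--     in place when transform_to_gamma_free is true."""
--     n = len(matrix)
--     m = len(matrix[0]) if matrix else 0
--     below = [None] * m   # below[j]: nearest row index > i with a nonzero in column j
--     ok = True
--     for i in range(n - 1, -1, -1):
--         row = matrix[i]
--         k = 0
--         while k < m:
--             if row[k] == 0 or below[k] is None:
--                 k += 1
--                 continue
--             r = below[k]
--             q = k + 1
--             while q < m:
--                 if row[q] == 0:
--                     q += 1
--                 elif matrix[r][q] == 0: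
--                     ok = False
--                     if not transform_to_gamma_free:
--                         return False
--                     row[q] = 0
--                     q += 1
--                 else:
--                     break
--             k = q
--         for j in range(m):
--             if row[j] != 0:
--                 below[j] = i
--     return ok
-- ===== Notes on version B (the rewrite author's own statement) =====
-- stated objective: alternative
-- what changed: Instead of rescanning each pivot's column downward for every pivot, B sweeps the rows bottom-up once while maintaining a per-column array of the nearest row below with a nonzero entry, and walks each row's nonzero columns with that cache.
-- outside the precondition, e.g. on gamma_free_matrix_bottom_up([[0, 0], []], False): A returns True, B raises IndexError; on gamma_free_matrix_bottom_up([[0], [0, 0], [1, 1], [1, 0]], False): A returns False, B returns True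
import Mathlib
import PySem

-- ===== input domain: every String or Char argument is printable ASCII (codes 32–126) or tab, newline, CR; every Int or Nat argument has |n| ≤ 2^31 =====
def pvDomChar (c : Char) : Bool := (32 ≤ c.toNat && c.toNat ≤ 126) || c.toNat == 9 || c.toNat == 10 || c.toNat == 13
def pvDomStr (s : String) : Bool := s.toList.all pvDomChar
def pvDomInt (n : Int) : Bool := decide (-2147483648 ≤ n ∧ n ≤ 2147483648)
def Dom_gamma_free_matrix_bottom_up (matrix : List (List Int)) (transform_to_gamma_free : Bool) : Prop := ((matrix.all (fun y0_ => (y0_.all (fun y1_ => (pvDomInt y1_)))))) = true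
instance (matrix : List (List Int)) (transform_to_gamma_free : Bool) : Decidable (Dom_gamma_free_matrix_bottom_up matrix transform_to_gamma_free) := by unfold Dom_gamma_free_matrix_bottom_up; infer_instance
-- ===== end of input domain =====

-- B replaces A's per-pivot column rescan by a per-column nearest-nonzero-below array maintained
-- bottom-up (one pass per cell). A mutates `matrix` in place when transform_to_gamma_free is true;
-- B performs the same mutation in Python, but the Lean equivalence proved here is about the RETURN
-- value only.

-- ===== PORT A =====
-- matrix[i][j] (in-range under Pre_, where every access A makes is in range)
def pvGet2 (m : List (List Int)) (i j : Nat) : Int := (m.getD i []).getD j 0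

-- `i_next = i + 1; while i_next < len(matrix) and matrix[i_next][j] == 0: i_next += 1`
def pvScanDownA (m : List (List Int)) (j : Nat) (iNext : Nat) : Nat :=
  if iNext < m.length then
    if pvGet2 m iNext j == 0 then pvScanDownA m j (iNext + 1) else iNext
  else iNext
termination_by m.length - iNext
decreasing_by rename_i h1 _; exact Nat.sub_succ_lt_self _ _ h1

-- `while j_next < len(matrix[i]) and matrix[i][j_next] == 0: j_next += 1`
def pvSkipZerosA (row : List Int) (jNext : Nat) : Nat :=
  if jNext < row.length then
    if row.getD jNext 0 == 0 then pvSkipZerosA row (jNext + 1) else jNext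
  else jNext
termination_by row.length - jNext
decreasing_by rename_i h1 _; exact Nat.sub_succ_lt_self _ _ h1

theorem pvSkipZerosA_ge (row : List Int) (j : Nat) : j ≤ pvSkipZerosA row j := by
  fun_induction pvSkipZerosA row j <;> omega

-- A's inner `while j_next < len(matrix[i]):` loop; `none` is the early `return was_gamma_free`
-- (necessarily False); after `matrix[i][j_next] = 0` the loop resumes at j_next + 1, which is the
-- point the zero-skip would reach anyway since the entry was just zeroed.
def pvInnerA (m : List (List Int)) (iNext : Nat) (transform : Bool)
    (row : List Int) (j jNext : Nat) (viol : Bool) : Option (List Int × Nat × Bool) :=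
  if jNext < row.length then
    if pvSkipZerosA row jNext == row.length then some (row, j + 1, viol)
    else if pvGet2 m iNext (pvSkipZerosA row jNext) == 0 then
      if transform then
        pvInnerA m iNext transform (row.set (pvSkipZerosA row jNext) 0) j
          (pvSkipZerosA row jNext + 1) true
      else none
    else some (row, pvSkipZerosA row jNext, viol)
  else some (row, j + 1, viol)
termination_by row.length - jNext
decreasing_by
  rename_i h1 _ _
  simp only [List.length_set]
  exact Nat.lt_of_le_of_lt
    (Nat.sub_le_sub_left (Nat.succ_le_succ (pvSkipZerosA_ge row jNext)) _)
    (Nat.sub_succ_lt_self _ _ h1)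

-- A's outer `while j < len(matrix[i]):` loop over one row; the fuel argument only makes the
-- loop total (j strictly increases, so row.length + 1 units are never exhausted)
def pvRowA (m : List (List Int)) (i : Nat) (transform : Bool) :
    Nat → List Int → Nat → Bool → Option (List Int × Bool)
  | 0, row, _, flag => some (row, flag)
  | fuel + 1, row, j, flag =>
    if j < row.length then
      if row.getD j 0 == 0 then pvRowA m i transform fuel row (j + 1) flag
      else
        if pvScanDownA m j (i + 1) == m.length then pvRowA m i transform fuel row (j + 1) flag
        else
          match pvInnerA m (pvScanDownA m j (i + 1)) transform row j (j + 1) false with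
          | none => none
          | some (row', j', v) => pvRowA m i transform fuel row' j' (flag && !v)
    else some (row, flag)

-- `for i in range(len(matrix) - 1, -1, -1)` with the in-place row update threaded through
def pvLoopA (transform : Bool) : Nat → List (List Int) → Bool → Bool
  | 0, _, flag => flag
  | k + 1, m, flag =>
    match pvRowA m k transform ((m.getD k []).length + 1) (m.getD k []) 0 flag with
    | none => false
    | some (row', flag') => pvLoopA transform k (m.set k row') flag'

def gamma_free_matrix_bottom_up (matrix : List (List Int)) (transform_to_gamma_free : Bool) : Bool :=
  pvLoopA transform_to_gamma_free matrix.length matrix true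

-- ===== PORT B =====
-- B's inner `while q < m:` loop; `none` is the early `return False`
def pvQLoopB (m : List (List Int)) (transform : Bool) (r : Nat)
    (row : List Int) (q mcols : Nat) (viol : Bool) : Option (List Int × Nat × Bool) :=
  if q < mcols then
    if row.getD q 0 == 0 then pvQLoopB m transform r row (q + 1) mcols viol
    else if pvGet2 m r q == 0 then
      if transform then pvQLoopB m transform r (row.set q 0) (q + 1) mcols true
      else none
    else some (row, q, viol)
  else some (row, q, viol)
termination_by mcols - q
decreasing_by
  · rename_i h1 _; exact Nat.sub_succ_lt_self _ _ h1
  · rename_i h1 _ _; exact Nat.sub_succ_lt_self _ _ h1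

-- B's `while k < m:` loop over one row, reading `below` instead of rescanning the column;
-- the fuel argument only makes the loop total (k strictly increases)
def pvKLoopB (m : List (List Int)) (transform : Bool) (below : List (Option Nat)) :
    Nat → List Int → Nat → Nat → Bool → Option (List Int × Bool)
  | 0, row, _, _, flag => some (row, flag)
  | fuel + 1, row, k, mcols, flag =>
    if k < mcols then
      if row.getD k 0 == 0 then pvKLoopB m transform below fuel row (k + 1) mcols flag
      else
        match below.getD k none with
        | none => pvKLoopB m transform below fuel row (k + 1) mcols flag
        | some r =>
          match pvQLoopB m transform r row (k + 1) mcols false with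
          | none => none
          | some (row', q, v) => pvKLoopB m transform below fuel row' q mcols (flag && !v)
    else some (row, flag)

-- `for j in range(m): if row[j] != 0: below[j] = i`
def pvUpdateBelow (below : List (Option Nat)) (row : List Int) (i mcols : Nat) :
    List (Option Nat) :=
  (List.range mcols).foldl
    (fun b j => if row.getD j 0 == 0 then b else b.set j (some i)) below

def pvLoopB (transform : Bool) (mcols : Nat) :
    Nat → List (List Int) → List (Option Nat) → Bool → Bool
  | 0, _, _, flag => flag
  | k + 1, m, below, flag =>
    match pvKLoopB m transform below (mcols + 1) (m.getD k []) 0 mcols flag with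
    | none => false
    | some (row', flag') =>
      pvLoopB transform mcols k (m.set k row') (pvUpdateBelow below row' k mcols) flag'

def gamma_free_matrix_bottom_up_alt (matrix : List (List Int)) (transform_to_gamma_free : Bool) :
    Bool :=
  pvLoopB transform_to_gamma_free (matrix.headD []).length matrix.length matrix
    (List.replicate (matrix.headD []).length none) true

-- ===== PRECONDITION & SPEC =====
-- Pre_ excludes ragged matrices (rows of unequal length): on those A's column scans raise
-- IndexError on many inputs and, where A happens to return, its value depends on which partial
-- scans stayed in range; B assumes a rectangular matrix.
def Pre_gamma_free_matrix_bottom_up (matrix : List (List Int)) (transform_to_gamma_free : Bool) : Prop :=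
  ∀ row ∈ matrix, row.length = (matrix.headD []).length
instance (matrix : List (List Int)) (transform_to_gamma_free : Bool) :
    Decidable (Pre_gamma_free_matrix_bottom_up matrix transform_to_gamma_free) := by
  unfold Pre_gamma_free_matrix_bottom_up; infer_instance
def pvWitness_gamma_free_matrix_bottom_up : List (List Int) × Bool := ([[1, 0], [0, 1]], false)

def Spec_gamma_free_matrix_bottom_up (matrix : List (List Int)) (transform_to_gamma_free : Bool) (out : Bool) : Prop := out = gamma_free_matrix_bottom_up_alt matrix transform_to_gamma_free
instance (matrix : List (List Int)) (transform_to_gamma_free : Bool) (out : Bool) : Decidable (Spec_gamma_free_matrix_bottom_up matrix transform_to_gamma_free out) := by unfold Spec_gamma_free_matrix_bottom_up; infer_instance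

-- ===== CLAIM (what is proved, stated in full; the proofs are below) =====
def Claim_equal_gamma_free_matrix_bottom_up : Prop := ∀ (matrix : List (List Int)) (transform_to_gamma_free : Bool), Dom_gamma_free_matrix_bottom_up matrix transform_to_gamma_free → Pre_gamma_free_matrix_bottom_up matrix transform_to_gamma_free → Spec_gamma_free_matrix_bottom_up matrix transform_to_gamma_free (gamma_free_matrix_bottom_up matrix transform_to_gamma_free)

-- ===== LEMMAS AND PROOFS =====

theorem pvInnerA_gt (m : List (List Int)) (iNext : Nat) (t : Bool)
    (row : List Int) (j jNext : Nat) (v : Bool) (hj : j < jNext)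
    (row' : List Int) (j' : Nat) (v' : Bool)
    (h : pvInnerA m iNext t row j jNext v = some (row', j', v')) : j < j' := by
  fun_induction pvInnerA m iNext t row j jNext v generalizing row' j' v' with
  | case1 => simp at h; omega
  | case2 row jNext viol h1 h2 h3 h4 ih =>
      exact ih (by have := pvSkipZerosA_ge row jNext; omega) _ _ _ h
  | case3 row jNext viol h1 h2 h3 h4 => simp_all
  | case4 row jNext viol h1 h2 h3 =>
      simp at h
      have := pvSkipZerosA_ge row jNext
      omega
  | case5 => simp at h; omega

theorem pvInnerA_length (m : List (List Int)) (iNext : Nat) (t : Bool)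
    (row : List Int) (j jNext : Nat) (v : Bool)
    (row' : List Int) (j' : Nat) (v' : Bool)
    (h : pvInnerA m iNext t row j jNext v = some (row', j', v')) :
    row'.length = row.length := by
  fun_induction pvInnerA m iNext t row j jNext v generalizing row' j' v' with
  | case1 => simp_all
  | case2 row jNext viol h1 h2 h3 h4 ih => simpa using ih _ _ _ h
  | case3 => simp_all
  | case4 => simp_all
  | case5 => simp_all

theorem pvScanDownA_le (m : List (List Int)) (j s : Nat) (h : s ≤ m.length) :
    pvScanDownA m j s ≤ m.length := by
  fun_induction pvScanDownA m j s <;> omega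

theorem getD_set_eq_ite {α : Type} (l : List α) (n : Nat) (a d : α) (jj : Nat) :
    (l.set n a).getD jj d = if jj = n ∧ n < l.length then a else l.getD jj d := by
  by_cases h : jj = n ∧ n < l.length
  · obtain ⟨rfl, h2⟩ := h
    simp [List.getD_eq_getElem?_getD, h2]
  · rw [if_neg h]
    by_cases he : jj = n
    · subst he
      have h4 : l[jj]? = none := by rw [List.getElem?_eq_none]; simp at h ⊢; omega
      have h5 : (l.set jj a)[jj]? = none := by rw [List.getElem?_eq_none]; simp at h ⊢; omega
      simp [List.getD_eq_getElem?_getD, h4, h5]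
    · simp [List.getD_eq_getElem?_getD, List.getElem?_set_ne (by omega : n ≠ jj)]

-- stepping over a zero entry does not change the inner loop's result
theorem pvInnerA_zero_step (m : List (List Int)) (iNext : Nat) (t : Bool)
    (row : List Int) (j jN : Nat) (v : Bool)
    (hlt : jN < row.length) (hz : row.getD jN 0 = 0) :
    pvInnerA m iNext t row j jN v = pvInnerA m iNext t row j (jN + 1) v := by
  have hb : (row.getD jN 0 == 0) = true := by simpa using hz
  have hskip : pvSkipZerosA row jN = pvSkipZerosA row (jN + 1) := by
    rw [pvSkipZerosA, if_pos hlt, if_pos hb]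
  by_cases h2 : jN + 1 < row.length
  · rw [pvInnerA, if_pos hlt, hskip]
    conv_rhs => rw [pvInnerA, if_pos h2]
  · have hlen : row.length = jN + 1 := by omega
    have h3 : pvSkipZerosA row (jN + 1) = jN + 1 := by rw [pvSkipZerosA]; simp [h2]
    rw [pvInnerA, if_pos hlt, hskip]
    conv_rhs => rw [pvInnerA, if_neg h2]
    simp [h3, hlen]

-- correspondence of the two inner loops
theorem pvInner_AB (m : List (List Int)) (r : Nat) (t : Bool) (mcols : Nat) :
    ∀ (row : List Int) (j jN : Nat) (v : Bool),
      row.length = mcols → j < jN → jN ≤ mcols →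
      (∀ x, j < x → x < jN → row.getD x 0 = 0) →
      (pvInnerA m r t row j jN v = none ∧ pvQLoopB m t r row jN mcols v = none) ∨
      (∃ row' j' v', pvInnerA m r t row j jN v = some (row', j', v') ∧
        ((pvQLoopB m t r row jN mcols v = some (row', j', v') ∧ j' < mcols ∧
            row'.getD j' 0 ≠ 0) ∨
         (pvQLoopB m t r row jN mcols v = some (row', mcols, v') ∧ j' = j + 1 ∧
            ∀ x, j < x → row'.getD x 0 = 0))) := by
  suffices H : ∀ (fuel : Nat) (row : List Int) (j jN : Nat) (v : Bool),
      mcols - jN ≤ fuel → row.length = mcols → j < jN → jN ≤ mcols →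
      (∀ x, j < x → x < jN → row.getD x 0 = 0) →
      (pvInnerA m r t row j jN v = none ∧ pvQLoopB m t r row jN mcols v = none) ∨
      (∃ row' j' v', pvInnerA m r t row j jN v = some (row', j', v') ∧
        ((pvQLoopB m t r row jN mcols v = some (row', j', v') ∧ j' < mcols ∧
            row'.getD j' 0 ≠ 0) ∨
         (pvQLoopB m t r row jN mcols v = some (row', mcols, v') ∧ j' = j + 1 ∧
            ∀ x, j < x → row'.getD x 0 = 0))) by
    intro row j jN v h1 h2 h3 h4
    exact H (mcols - jN) row j jN v le_rfl h1 h2 h3 h4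
  have terminal : ∀ (row : List Int) (j : Nat) (v : Bool), row.length = mcols → (j < mcols ∨ True) →
      (∀ x, j < x → x < mcols → row.getD x 0 = 0) →
      (pvInnerA m r t row j mcols v = none ∧ pvQLoopB m t r row mcols mcols v = none) ∨
      (∃ row' j' v', pvInnerA m r t row j mcols v = some (row', j', v') ∧
        ((pvQLoopB m t r row mcols mcols v = some (row', j', v') ∧ j' < mcols ∧
            row'.getD j' 0 ≠ 0) ∨
         (pvQLoopB m t r row mcols mcols v = some (row', mcols, v') ∧ j' = j + 1 ∧
            ∀ x, j < x → row'.getD x 0 = 0))) := by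
    intro row j v hlen _ hz
    refine Or.inr ⟨row, j + 1, v, ?_, Or.inr ⟨?_, rfl, ?_⟩⟩
    · rw [pvInnerA, if_neg (by omega)]
    · rw [pvQLoopB, if_neg (by omega)]
    · intro x hx
      by_cases hxm : x < mcols
      · exact hz x hx hxm
      · rw [List.getD_eq_getElem?_getD, List.getElem?_eq_none (by omega)]; rfl
  intro fuel
  induction fuel with
  | zero =>
      intro row j jN v hf hlen hj hle hz
      have : jN = mcols := by omega
      subst this
      exact terminal row j v hlen (Or.inr trivial) hz
  | succ n ih =>
      intro row j jN v hf hlen hj hle hz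
      by_cases hlt : jN < mcols
      · have hltr : jN < row.length := by omega
        by_cases hz0 : row.getD jN 0 = 0
        · have hA := pvInnerA_zero_step m r t row j jN v hltr hz0
          have hB : pvQLoopB m t r row jN mcols v = pvQLoopB m t r row (jN + 1) mcols v := by
            rw [pvQLoopB, if_pos hlt, if_pos (by simpa using hz0)]
          rw [hA, hB]
          exact ih row j (jN + 1) v (by omega) hlen (by omega) (by omega)
            (fun x hx1 hx2 => by
              by_cases hxe : x = jN
              · subst hxe; exact hz0
              · exact hz x hx1 (by omega))
        · have hskip : pvSkipZerosA row jN = jN := by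
            rw [pvSkipZerosA, if_pos hltr, if_neg (by simpa using hz0)]
          by_cases hg : pvGet2 m r jN = 0
          · cases t with
            | false =>
                refine Or.inl ⟨?_, ?_⟩
                · rw [pvInnerA, if_pos hltr, hskip, if_neg (by simp; omega),
                    if_pos (by simpa using hg), if_neg (by simp)]
                · rw [pvQLoopB, if_pos hlt, if_neg (by simpa using hz0),
                    if_pos (by simpa using hg), if_neg (by simp)]
            | true =>
                have hA : pvInnerA m r true row j jN v =
                    pvInnerA m r true (row.set jN 0) j (jN + 1) true := by
                  rw [pvInnerA, if_pos hltr, hskip, if_neg (by simp; omega),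
                    if_pos (by simpa using hg), if_pos rfl]
                have hB : pvQLoopB m true r row jN mcols v =
                    pvQLoopB m true r (row.set jN 0) (jN + 1) mcols true := by
                  rw [pvQLoopB, if_pos hlt, if_neg (by simpa using hz0),
                    if_pos (by simpa using hg), if_pos rfl]
                rw [hA, hB]
                exact ih (row.set jN 0) j (jN + 1) true (by omega) (by simpa using hlen)
                  (by omega) (by omega)
                  (fun x hx1 hx2 => by
                    rw [getD_set_eq_ite]
                    by_cases hxe : x = jN
                    · rw [if_pos ⟨hxe, hltr⟩]
                    · rw [if_neg (by tauto)]
                      exact hz x hx1 (by omega))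
          · refine Or.inr ⟨row, jN, v, ?_, Or.inl ⟨?_, hlt, hz0⟩⟩
            · rw [pvInnerA, if_pos hltr, hskip, if_neg (by simp; omega),
                if_neg (by simpa using hg)]
            · rw [pvQLoopB, if_pos hlt, if_neg (by simpa using hz0),
                if_neg (by simpa using hg)]
      · have : jN = mcols := by omega
        subst this
        exact terminal row j v hlen (Or.inr trivial) hz

-- a row whose entries at indices ≥ j are all zero is processed trivially by A's row loop
theorem pvRowA_allzero (m : List (List Int)) (i : Nat) (t : Bool) :
    ∀ (fuel : Nat) (row : List Int) (j : Nat) (flag : Bool),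
      (∀ x, j ≤ x → row.getD x 0 = 0) →
      pvRowA m i t fuel row j flag = some (row, flag) := by
  intro fuel
  induction fuel with
  | zero => intro row j flag _; rfl
  | succ n ih =>
      intro row j flag hz
      rw [pvRowA]
      by_cases hj : j < row.length
      · rw [if_pos hj, if_pos (by simpa using hz j le_rfl)]
        exact ih row (j + 1) flag (fun x hx => hz x (by omega))
      · rw [if_neg hj]

-- reduction of A's row loop at a pivot column
theorem pvRowA_pivot (m : List (List Int)) (i : Nat) (t : Bool) (fuel : Nat) (row : List Int)
    (k : Nat) (flag : Bool) (hk : k < row.length) (hnz : ¬ row.getD k 0 = 0)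
    (hscan : ¬ pvScanDownA m k (i + 1) = m.length) :
    pvRowA m i t (fuel + 1) row k flag =
      match pvInnerA m (pvScanDownA m k (i + 1)) t row k (k + 1) false with
      | none => none
      | some (row', j', v) => pvRowA m i t fuel row' j' (flag && !v) := by
  rw [pvRowA, if_pos hk, if_neg (by simpa using hnz), if_neg (by simpa using hscan)]

-- reduction of B's row loop at a pivot column
theorem pvKLoopB_pivot (m : List (List Int)) (t : Bool) (below : List (Option Nat))
    (fuel : Nat) (row : List Int) (k mcols : Nat) (flag : Bool) (r : Nat)
    (hk : k < mcols) (hnz : ¬ row.getD k 0 = 0) (hb : below.getD k none = some r) :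
    pvKLoopB m t below (fuel + 1) row k mcols flag =
      match pvQLoopB m t r row (k + 1) mcols false with
      | none => none
      | some (row', q, v) => pvKLoopB m t below fuel row' q mcols (flag && !v) := by
  rw [pvKLoopB, if_pos hk, if_neg (by simpa using hnz), hb]

-- reduction of B's row loop at a column with no nonzero entry below
theorem pvKLoopB_nobelow (m : List (List Int)) (t : Bool) (below : List (Option Nat))
    (fuel : Nat) (row : List Int) (k mcols : Nat) (flag : Bool)
    (hk : k < mcols) (hb : below.getD k none = none) :
    pvKLoopB m t below (fuel + 1) row k mcols flag =
      pvKLoopB m t below fuel row (k + 1) mcols flag := by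
  rw [pvKLoopB, if_pos hk, hb]
  split <;> rfl

theorem pvRowA_length (m : List (List Int)) (i : Nat) (t : Bool) :
    ∀ (fuel : Nat) (row : List Int) (j : Nat) (flag : Bool) (row' : List Int) (flag' : Bool),
      pvRowA m i t fuel row j flag = some (row', flag') → row'.length = row.length := by
  intro fuel
  induction fuel with
  | zero =>
      intro row j flag row' flag' h
      simp only [pvRowA, Option.some.injEq, Prod.mk.injEq] at h
      rw [← h.1]
  | succ n ih =>
      intro row j flag row' flag' h
      rw [pvRowA] at h
      by_cases hj : j < row.length
      · rw [if_pos hj] at h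
        by_cases hz : row.getD j 0 = 0
        · rw [if_pos (by simpa using hz)] at h
          exact ih _ _ _ _ _ h
        · rw [if_neg (by simpa using hz)] at h
          by_cases hs : pvScanDownA m j (i + 1) = m.length
          · rw [if_pos (by simpa using hs)] at h
            exact ih _ _ _ _ _ h
          · rw [if_neg (by simpa using hs)] at h
            cases hInner : pvInnerA m (pvScanDownA m j (i + 1)) t row j (j + 1) false with
            | none => rw [hInner] at h; simp at h
            | some trip =>
                obtain ⟨row2, j2, v2⟩ := trip
                rw [hInner] at h
                rw [ih row2 j2 (flag && !v2) row' flag' h,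
                  pvInnerA_length m (pvScanDownA m j (i + 1)) t row j (j + 1) false
                    row2 j2 v2 hInner]
      · rw [if_neg hj] at h
        simp only [Option.some.injEq, Prod.mk.injEq] at h
        rw [← h.1]

-- correspondence of the two row loops, given that `below` caches A's downward scans
theorem pvRow_AB (m : List (List Int)) (i : Nat) (t : Bool) (below : List (Option Nat))
    (mcols : Nat) (hi : i + 1 ≤ m.length)
    (hbel : ∀ jj, jj < mcols → below.getD jj none =
      (if pvScanDownA m jj (i + 1) < m.length then some (pvScanDownA m jj (i + 1)) else none)) :
    ∀ (fa fb : Nat) (row : List Int) (j : Nat) (flag : Bool), row.length = mcols →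
      mcols - j < fa → mcols - j < fb →
      pvRowA m i t fa row j flag = pvKLoopB m t below fb row j mcols flag := by
  intro fa
  induction fa with
  | zero => intro fb row j flag _ hfa _; omega
  | succ n ih =>
      intro fb row j flag hlen hfa hfb
      cases fb with
      | zero => omega
      | succ nb =>
          by_cases hj : j < mcols
          · by_cases hz0 : row.getD j 0 = 0
            · rw [pvRowA, if_pos (by omega), if_pos (by simpa using hz0),
                pvKLoopB, if_pos hj, if_pos (by simpa using hz0)]
              exact ih nb row (j + 1) flag hlen (by omega) (by omega)
            · have hb := hbel j hj
              by_cases hnone : pvScanDownA m j (i + 1) = m.length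
              · have hbn : below.getD j none = none := by rw [hb, if_neg (by omega)]
                rw [pvRowA, if_pos (by omega), if_neg (by simpa using hz0),
                  if_pos (by simpa using hnone),
                  pvKLoopB_nobelow m t below nb row j mcols flag hj hbn]
                exact ih nb row (j + 1) flag hlen (by omega) (by omega)
              · have hscan_le := pvScanDownA_le m j (i + 1) hi
                have hr : below.getD j none = some (pvScanDownA m j (i + 1)) := by
                  rw [hb, if_pos (by omega)]
                rw [pvRowA_pivot m i t n row j flag (by omega) hz0 hnone,
                  pvKLoopB_pivot m t below nb row j mcols flag (pvScanDownA m j (i + 1))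
                    hj hz0 hr]
                rcases pvInner_AB m (pvScanDownA m j (i + 1)) t mcols row j (j + 1) false hlen
                    (by omega) (by omega) (fun x hx1 hx2 => by omega) with
                  ⟨hA, hB⟩ | ⟨row', j', v', hA, hrest⟩
                · rw [hA, hB]
                · rcases hrest with ⟨hB, hjlt, _⟩ | ⟨hB, hj'', hall⟩
                  · rw [hA, hB]
                    have hgt := pvInnerA_gt m (pvScanDownA m j (i + 1)) t row j (j + 1) false
                      (by omega) row' j' v' hA
                    have hlen' := pvInnerA_length m (pvScanDownA m j (i + 1)) t row j (j + 1)
                      false row' j' v' hA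
                    exact ih nb row' j' (flag && !v') (by omega) (by omega) (by omega)
                  · rw [hA, hB]
                    show pvRowA m i t n row' j' (flag && !v') =
                      pvKLoopB m t below nb row' mcols mcols (flag && !v')
                    rw [pvRowA_allzero m i t n row' j' (flag && !v')
                      (by subst hj''; intro x hx; exact hall x (by omega))]
                    cases nb with
                    | zero => rfl
                    | succ nb' => rw [pvKLoopB, if_neg (by omega)]
          · rw [pvRowA, if_neg (by omega), pvKLoopB, if_neg (by omega)]

theorem pvUpdateBelow_length (below : List (Option Nat)) (row : List Int) (i mcols : Nat) :
    (pvUpdateBelow below row i mcols).length = below.length := by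
  unfold pvUpdateBelow
  generalize List.range mcols = l
  induction l generalizing below with
  | nil => rfl
  | cons x xs ih => rw [List.foldl_cons, ih]; split <;> simp

theorem pvUpdateBelow_getD_aux (below : List (Option Nat)) (row : List Int) (i : Nat) :
    ∀ (mcols jj : Nat),
      (pvUpdateBelow below row i mcols).getD jj none =
        if jj < mcols ∧ jj < below.length ∧ row.getD jj 0 ≠ 0 then some i
        else below.getD jj none := by
  intro mcols
  induction mcols with
  | zero => intro jj; simp [pvUpdateBelow]
  | succ n ih =>
      intro jj
      have hstep : pvUpdateBelow below row i (n + 1) =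
          if row.getD n 0 == 0 then pvUpdateBelow below row i n
          else (pvUpdateBelow below row i n).set n (some i) := by
        unfold pvUpdateBelow
        rw [List.range_succ, List.foldl_append, List.foldl_cons, List.foldl_nil]
      rw [hstep]
      by_cases hz : row.getD n 0 = 0
      · rw [if_pos (by simpa using hz), ih]
        by_cases he : jj = n
        · subst he
          have hz' : row[jj]?.getD 0 = 0 := by rw [← List.getD_eq_getElem?_getD]; exact hz
          simp [hz']
        · split_ifs with h1 h2 h2 <;> first | rfl | omega
      · rw [if_neg (by simpa using hz)]
        rw [getD_set_eq_ite, pvUpdateBelow_length, ih]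
        by_cases he : jj = n
        · subst he
          by_cases hl : jj < below.length
          · have hz' : ¬ row[jj]?.getD 0 = 0 := by
              rw [← List.getD_eq_getElem?_getD]; exact hz
            simp [hl, hz']
          · simp [hl]
        · rw [if_neg (by tauto)]
          split_ifs with h1 h2 h2 <;> first | rfl | omega

theorem pvUpdateBelow_getD (below : List (Option Nat)) (row : List Int) (i mcols : Nat)
    (hlen : mcols ≤ below.length) (jj : Nat) (hjj : jj < mcols) :
    (pvUpdateBelow below row i mcols).getD jj none =
      if row.getD jj 0 = 0 then below.getD jj none else some i := by
  rw [pvUpdateBelow_getD_aux]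
  by_cases hz : row.getD jj 0 = 0
  · have hz' : row[jj]?.getD 0 = 0 := by rw [← List.getD_eq_getElem?_getD]; exact hz
    simp [hz']
  · rw [if_pos ⟨hjj, by omega, hz⟩, if_neg hz]

theorem pvGet2_set_ne (m : List (List Int)) (k : Nat) (row' : List Int) (s jj : Nat)
    (h : s ≠ k) : pvGet2 (m.set k row') s jj = pvGet2 m s jj := by
  unfold pvGet2
  have h2 : (m.set k row')[s]? = m[s]? := List.getElem?_set_ne (Ne.symm h)
  simp [List.getD_eq_getElem?_getD, h2]

theorem pvScanDownA_set (m : List (List Int)) (k : Nat) (row' : List Int) (jj : Nat) :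
    ∀ s, k < s → pvScanDownA (m.set k row') jj s = pvScanDownA m jj s := by
  intro s hks
  fun_induction pvScanDownA m jj s with
  | case1 s h1 h2 ih =>
      rw [pvScanDownA]
      simp only [List.length_set]
      rw [if_pos h1, pvGet2_set_ne m k row' s jj (by omega), if_pos h2]
      exact ih (by omega)
  | case2 s h1 h2 =>
      rw [pvScanDownA]
      simp only [List.length_set]
      rw [if_pos h1, pvGet2_set_ne m k row' s jj (by omega), if_neg h2]
  | case3 s h1 =>
      rw [pvScanDownA]
      simp only [List.length_set]
      rw [if_neg h1]

-- correspondence of the two outer loops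
theorem pvLoop_AB (t : Bool) (mcols : Nat) :
    ∀ (k : Nat) (m : List (List Int)) (below : List (Option Nat)) (flag : Bool),
      k ≤ m.length →
      (∀ r ∈ m, r.length = mcols) →
      below.length = mcols →
      (∀ jj, jj < mcols → below.getD jj none =
        (if pvScanDownA m jj k < m.length then some (pvScanDownA m jj k) else none)) →
      pvLoopA t k m flag = pvLoopB t mcols k m below flag := by
  intro k
  induction k with
  | zero => intro m below flag _ _ _ _; rfl
  | succ k ih =>
      intro m below flag hk hrect hblen hbel
      have hkm : k < m.length := by omega
      have hgetk : m.getD k [] = m[k] := by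
        simp [List.getD_eq_getElem?_getD, List.getElem?_eq_getElem hkm]
      have hrow : (m.getD k []).length = mcols := by
        rw [hgetk]; exact hrect _ (List.getElem_mem hkm)
      have hAB := pvRow_AB m k t below mcols (by omega) (fun jj hjj => hbel jj hjj)
        ((m.getD k []).length + 1) (mcols + 1) (m.getD k []) 0 flag hrow
        (by omega) (by omega)
      rw [pvLoopA, pvLoopB, hAB]
      cases hres : pvKLoopB m t below (mcols + 1) (m.getD k []) 0 mcols flag with
      | none => rfl
      | some p =>
          obtain ⟨row', flag'⟩ := p
          have hArow : pvRowA m k t ((m.getD k []).length + 1) (m.getD k []) 0 flag =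
              some (row', flag') := by
            rw [hAB, hres]
          have hrlen : row'.length = mcols := by
            rw [pvRowA_length m k t ((m.getD k []).length + 1) (m.getD k []) 0 flag
              row' flag' hArow, hrow]
          show pvLoopA t k (m.set k row') flag' =
            pvLoopB t mcols k (m.set k row') (pvUpdateBelow below row' k mcols) flag'
          apply ih
          · simp; omega
          · intro r hr
            rcases List.mem_or_eq_of_mem_set hr with h | h
            · exact hrect r h
            · rw [h]; exact hrlen
          · rw [pvUpdateBelow_length, hblen]
          · intro jj hjj
            have hsd : pvScanDownA (m.set k row') jj k =
                if row'.getD jj 0 = 0 then pvScanDownA m jj (k + 1) else k := by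
              rw [pvScanDownA]
              simp only [List.length_set]
              rw [if_pos hkm]
              have hget : pvGet2 (m.set k row') k jj = row'.getD jj 0 := by
                unfold pvGet2
                have hsome : (m.set k row')[k]? = some row' := by
                  rw [List.getElem?_set_self (by simpa using hkm)]
                simp [List.getD_eq_getElem?_getD, hsome]
              rw [hget]
              by_cases hz : row'.getD jj 0 = 0
              · rw [if_pos (by simpa using hz), if_pos hz,
                  pvScanDownA_set m k row' jj (k + 1) (by omega)]
              · rw [if_neg (by simpa using hz), if_neg hz]
            rw [pvUpdateBelow_getD below row' k mcols (by omega) jj hjj, hsd]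
            simp only [List.length_set]
            by_cases hz : row'.getD jj 0 = 0
            · rw [if_pos hz, if_pos hz, hbel jj hjj]
            · rw [if_neg hz, if_neg hz, if_pos hkm]

-- ===== VERDICT (by name: the statement is the Claim_ definition above) =====
theorem gamma_free_matrix_bottom_up_spec : Claim_equal_gamma_free_matrix_bottom_up := by
  intro matrix t _ hpre
  unfold Spec_gamma_free_matrix_bottom_up gamma_free_matrix_bottom_up gamma_free_matrix_bottom_up_alt
  exact pvLoop_AB t (matrix.headD []).length matrix.length matrix _ true le_rfl hpre
    (by simp) (by
      intro jj hjj
      have h1 : pvScanDownA matrix jj matrix.length = matrix.length := by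
        unfold pvScanDownA; simp
      simp [h1])
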